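-- pv_equiv track=rewrite | github.com/markuspleijzier/ORFDiscovery | ORFDiscovery.py | rna_to_codon_aFrame
-- ===== SOURCE A (Python) =====
-- def get_codon(sequence,position):
--
--     codon = ""
--
--     if position <= len(sequence)-3:
--
--         codon = sequence[position:position+3]
--
--     return codon
--
-- def rna_to_codon_aFrame(rna_seq):
--
--     #get codon sequences for All three frames
--
--     codon_list_first = []
--     codon_list_second = []
--     codon_list_third = []
--
--     pos = [0,1,2]
--
--
--     while pos[0]<len(rna_seq):
--
--         codon = get_codon(rna_seq, pos[0])
--
--         if codon != "":
--
--             codon_list_first.append(codon)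
--
--         pos[0] = pos[0] + 3
--
--     while pos[1]<len(rna_seq):
--
--         codon = get_codon(rna_seq, pos[1])
--
--         if codon != "":
--
--             codon_list_second.append(codon)
--
--         pos[1] = pos[1] + 3
--
--     while pos[2] < len(rna_seq):
--
--         codon = get_codon(rna_seq, pos[2])
--
--         if codon != "":
--
--             codon_list_third.append(codon)
--
--         pos[2] = pos[2] + 3
--
--     return codon_list_first, codon_list_second, codon_list_third
-- ===== SOURCE B (Python) =====
-- def rna_to_codon_aFrame(rna_seq):
--     # Single pass: dispatch each full codon to its reading frame by i % 3.
--     frames = ([], [], [])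
--     for i in range(len(rna_seq) - 2):
--         frames[i % 3].append(rna_seq[i:i+3])
--     return frames
-- ===== Notes on version B (the rewrite author's own statement) =====
-- stated objective: simpler
-- what changed: Replaces the three separate offset-stepped while-loops (each calling a guarded get_codon helper) by one pass over all positions that dispatches each length-3 slice to its reading frame via i % 3.
import Mathlib
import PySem

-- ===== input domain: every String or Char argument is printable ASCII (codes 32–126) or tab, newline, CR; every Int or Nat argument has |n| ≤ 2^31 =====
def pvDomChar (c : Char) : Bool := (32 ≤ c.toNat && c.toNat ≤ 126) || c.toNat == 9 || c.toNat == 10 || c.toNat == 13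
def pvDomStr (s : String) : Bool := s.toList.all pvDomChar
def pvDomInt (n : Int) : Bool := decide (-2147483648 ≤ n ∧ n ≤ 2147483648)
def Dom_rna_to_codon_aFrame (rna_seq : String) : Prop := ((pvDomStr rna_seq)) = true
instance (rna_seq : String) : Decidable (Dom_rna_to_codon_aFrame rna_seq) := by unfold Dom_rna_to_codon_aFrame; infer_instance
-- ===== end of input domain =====

-- B replaces A's three offset-stepped while-loops by one pass dispatching each full codon to frames[i % 3] (simpler decomposition, same cost).


-- ===== PORT A =====
def get_codon (sequence : String) (position : Int) : String :=
  let codon := ""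
  if position ≤ PySem.Str.len sequence - 3 then
    PySem.Str.slice sequence (some position) (some (position + 3))
  else codon

-- one of A's three identical while-loops (while pos < len: maybe-append get_codon; pos += 3)
def aFrameLoop (s : String) (pos : Nat) : List String :=
  if pos < s.toList.length then
    (let codon := get_codon s (pos : Int)
     (if codon ≠ "" then [codon] else [])) ++ aFrameLoop s (pos + 3)
  else []
termination_by s.toList.length - pos
decreasing_by
  omega

def rna_to_codon_aFrame (rna_seq : String) : List String × List String × List String :=
  (aFrameLoop rna_seq 0, aFrameLoop rna_seq 1, aFrameLoop rna_seq 2)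

-- ===== PORT B =====
def rna_to_codon_aFrame_alt (rna_seq : String) : List String × List String × List String :=
  (List.range (rna_seq.toList.length - 2)).foldl
    (fun (f : List String × List String × List String) (i : Nat) =>
      let c := PySem.Str.slice rna_seq (some (i : Int)) (some ((i : Int) + 3))
      if i % 3 = 0 then (f.1 ++ [c], f.2.1, f.2.2)
      else if i % 3 = 1 then (f.1, f.2.1 ++ [c], f.2.2)
      else (f.1, f.2.1, f.2.2 ++ [c]))
    ([], [], [])

-- ===== PRECONDITION & SPEC =====
def Spec_rna_to_codon_aFrame (rna_seq : String) (out : List String × List String × List String) : Prop := out = rna_to_codon_aFrame_alt rna_seq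
instance (rna_seq : String) (out : List String × List String × List String) : Decidable (Spec_rna_to_codon_aFrame rna_seq out) := by unfold Spec_rna_to_codon_aFrame; infer_instance

-- ===== CLAIM (what is proved, stated in full; the proofs are below) =====
def Claim_equal_rna_to_codon_aFrame : Prop := ∀ (rna_seq : String), Dom_rna_to_codon_aFrame rna_seq → Spec_rna_to_codon_aFrame rna_seq (rna_to_codon_aFrame rna_seq)

-- ===== LEMMAS AND PROOFS =====

-- the codon slice at position i (as both programs compute it)
def pvSl (s : String) (i : Nat) : String :=
  PySem.Str.slice s (some (i : Int)) (some ((i : Int) + 3))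

theorem pvSl_ne_empty (s : String) (i : Nat) (h : i + 3 ≤ s.toList.length) :
    pvSl s i ≠ "" := by
  intro he
  have hl : (pvSl s i).toList.length = 3 := by
    show (PySem.Str.slice s (some (i : Int)) (some ((i : Int) + 3))).toList.length = 3
    rw [PySem.Str.toList_slice]
    show (PySem.List.slice s.toList (some (i : Int)) (some ((i : Int) + 3))).length = 3
    have : ((i : Int) + 3) = ((i + 3 : Nat) : Int) := by push_cast; ring
    rw [this, PySem.List.length_slice, PySem.List.clampIdx_natCast, PySem.List.clampIdx_natCast]
    omega
  rw [he] at hl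
  simp at hl

theorem loopA_eq (s : String) (pos : Nat) :
    aFrameLoop s pos = (List.range' pos ((s.toList.length - pos) / 3) 3).map (pvSl s) := by
  induction pos using aFrameLoop.induct s with
  | case1 pos h ih =>
    rw [aFrameLoop, if_pos h]
    by_cases h3 : pos + 3 ≤ s.toList.length
    · have hc : get_codon s (pos : Int) = pvSl s pos := by
        unfold get_codon pvSl
        rw [if_pos]
        simp only [PySem.Str.len_eq]
        omega
      have hm : (s.toList.length - pos) / 3 = (s.toList.length - (pos + 3)) / 3 + 1 := by omega
      rw [hc, if_pos (pvSl_ne_empty s pos h3), ih, hm, List.range'_succ]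
      simp
    · have hc : get_codon s (pos : Int) = "" := by
        unfold get_codon
        rw [if_neg]
        simp only [PySem.Str.len_eq]
        omega
      have hm0 : (s.toList.length - pos) / 3 = 0 := by omega
      have hm3 : (s.toList.length - (pos + 3)) / 3 = 0 := by omega
      rw [hc, ih, hm0, hm3]
      simp
  | case2 pos h =>
    rw [aFrameLoop, if_neg h]
    have : (s.toList.length - pos) / 3 = 0 := by omega
    rw [this]
    simp

-- the i%3=k bucket of B's single pass, as a filtered range
def pvBucket (s : String) (k n : Nat) : List String :=
  ((List.range n).filter (fun i => i % 3 == k)).map (pvSl s)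

theorem foldB_eq (s : String) (n : Nat) :
    ∀ (a b c : List String),
      (List.range n).foldl
        (fun (f : List String × List String × List String) (i : Nat) =>
          let c := PySem.Str.slice s (some (i : Int)) (some ((i : Int) + 3))
          if i % 3 = 0 then (f.1 ++ [c], f.2.1, f.2.2)
          else if i % 3 = 1 then (f.1, f.2.1 ++ [c], f.2.2)
          else (f.1, f.2.1, f.2.2 ++ [c]))
        (a, b, c)
      = (a ++ pvBucket s 0 n, b ++ pvBucket s 1 n, c ++ pvBucket s 2 n) := by
  induction n with
  | zero => intro a b c; simp [pvBucket]
  | succ n ih =>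
    intro a b c
    rw [List.range_succ, List.foldl_append, ih]
    have hb : ∀ k, pvBucket s k (n + 1) =
        pvBucket s k n ++ (if n % 3 == k then [pvSl s n] else []) := by
      intro k
      unfold pvBucket
      rw [List.range_succ, List.filter_append]
      by_cases hk : n % 3 = k <;> simp [hk]
    simp only [List.foldl_cons, List.foldl_nil]
    have h3 : n % 3 = 0 ∨ n % 3 = 1 ∨ n % 3 = 2 := by omega
    rcases h3 with h | h | h <;>
      simp [h, hb, pvSl, List.append_assoc]

theorem filter_mod3 (k : Nat) (hk : k < 3) (n : Nat) :
    (List.range n).filter (fun i => i % 3 == k) = List.range' k ((n - k + 2) / 3) 3 := by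
  induction n with
  | zero =>
    have h0 : (0 - k + 2) / 3 = 0 := by omega
    rw [h0]
    simp
  | succ n ih =>
    rw [List.range_succ, List.filter_append, ih]
    by_cases hn : n % 3 = k
    · have hm : (n + 1 - k + 2) / 3 = (n - k + 2) / 3 + 1 := by omega
      have hpos : k + 3 * ((n - k + 2) / 3) = n := by omega
      rw [hm, List.range'_concat, hpos]
      simp [hn]
    · have hm : (n + 1 - k + 2) / 3 = (n - k + 2) / 3 := by omega
      rw [hm]
      simp [hn]

theorem bucket_eq_loop (s : String) (k : Nat) (hk : k < 3) :
    pvBucket s k (s.toList.length - 2) = aFrameLoop s k := by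
  rw [loopA_eq, pvBucket, filter_mod3 k hk]
  have : (s.toList.length - 2 - k + 2) / 3 = (s.toList.length - k) / 3 := by omega
  rw [this]

-- ===== VERDICT (by name: the statement is the Claim_ definition above) =====
theorem rna_to_codon_aFrame_spec : Claim_equal_rna_to_codon_aFrame := by
  intro s _
  show rna_to_codon_aFrame s = rna_to_codon_aFrame_alt s
  unfold rna_to_codon_aFrame rna_to_codon_aFrame_alt
  rw [foldB_eq s (s.toList.length - 2) [] [] []]
  simp only [List.nil_append]
  rw [bucket_eq_loop s 0 (by omega), bucket_eq_loop s 1 (by omega),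
      bucket_eq_loop s 2 (by omega)]
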